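-- pv_equiv track=rewrite | github.com/piergiuliol/xCSG-Value-Tracker | backend/takeaways.py | takeaway_cohort_learning_curve
-- ===== SOURCE A (Python) =====
-- from collections import defaultdict
--
-- NEUTRAL_EMPTY = "Not enough data yet"
--
-- def takeaway_cohort_learning_curve(projects: list, aggregates: dict, min_n: int = 1) -> str:
--     if not projects:
--         return NEUTRAL_EMPTY
--     counts: dict = defaultdict(int)
--     for p in projects:
--         key = p.get("practice_name") or p.get("practice_code") or "Unassigned"
--         counts[key] += 1
--     qualifying = sum(1 for n in counts.values() if n >= min_n)
--     if qualifying == 0: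
--         return f"No cohort reached {min_n} projects yet"
--     return f"{qualifying} practice cohorts with ≥{min_n} projects"
-- ===== SOURCE B (Python) =====
-- def takeaway_cohort_learning_curve(projects: list, aggregates: dict, min_n: int = 1) -> str:
--     if not projects:
--         return "Not enough data yet"
--     keys = [p.get("practice_name") or p.get("practice_code") or "Unassigned" for p in projects]
--     qualifying = 0
--     # repeatedly strip one cohort's occurrences: no counts dict is ever built
--     while keys:
--         k = keys[0]
--         rest = [x for x in keys if x != k]
--         if len(keys) - len(rest) >= min_n:
--             qualifying += 1
--         keys = rest
--     if qualifying == 0: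
--         return f"No cohort reached {min_n} projects yet"
--     return f"{qualifying} practice cohorts with ≥{min_n} projects"
-- ===== Notes on version B (the rewrite author's own statement) =====
-- stated objective: alternative
-- what changed: Replaces A's defaultdict counting pass plus a sum over the count values by a dict-free partition loop: repeatedly take the first remaining key, remove all its occurrences by filtering, and judge that cohort's size from the length drop, so no counts mapping exists at any point.
import Mathlib
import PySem

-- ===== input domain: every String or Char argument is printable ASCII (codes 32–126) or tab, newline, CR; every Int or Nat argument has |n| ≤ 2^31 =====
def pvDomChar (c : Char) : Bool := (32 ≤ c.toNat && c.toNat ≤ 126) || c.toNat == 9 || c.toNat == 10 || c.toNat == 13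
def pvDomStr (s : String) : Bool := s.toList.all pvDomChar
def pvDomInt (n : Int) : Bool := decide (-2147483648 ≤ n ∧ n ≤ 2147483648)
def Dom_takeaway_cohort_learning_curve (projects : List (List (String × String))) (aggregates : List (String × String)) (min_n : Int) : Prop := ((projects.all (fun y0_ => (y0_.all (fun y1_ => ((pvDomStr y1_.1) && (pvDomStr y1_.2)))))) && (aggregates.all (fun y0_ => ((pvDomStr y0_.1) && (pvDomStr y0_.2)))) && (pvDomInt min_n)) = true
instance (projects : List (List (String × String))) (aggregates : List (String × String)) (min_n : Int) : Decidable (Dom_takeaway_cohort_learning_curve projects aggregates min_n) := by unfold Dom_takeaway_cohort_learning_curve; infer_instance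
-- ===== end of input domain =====

-- B replaces A's defaultdict counting + sum over the count values by a dict-free partition
-- loop: strip the first remaining key's occurrences and judge the cohort from the length drop.

-- ===== PORT A =====
-- shared key expression: p.get("practice_name") or p.get("practice_code") or "Unassigned"
-- (Python 'or': None and the empty string are falsy, so both fall through to the next operand)
def pvOrStr (a : Option String) (b : String) : String :=
  match a with
  | some s => if s = "" then b else s
  | none => b

def pvKeyOf (p : List (String × String)) : String :=
  pvOrStr ((PySem.Dict.mk p).get? "practice_name")
    (pvOrStr ((PySem.Dict.mk p).get? "practice_code") "Unassigned")

def takeaway_cohort_learning_curve (projects : List (List (String × String))) (aggregates : List (String × String)) (min_n : Int) : String :=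
  if projects = [] then "Not enough data yet"
  else
    -- counts = defaultdict(int); for p in projects: counts[key] += 1
    let counts : PySem.Dict String Int :=
      projects.foldl (fun d p => d.modify (pvKeyOf p) 0 (· + 1)) PySem.Dict.empty
    -- qualifying = sum(1 for n in counts.values() if n >= min_n)
    let qualifying : Int :=
      counts.values.foldl (fun acc n => if min_n ≤ n then acc + 1 else acc) 0
    if qualifying = 0 then
      "No cohort reached " ++ PySem.Int.toStr min_n ++ " projects yet"
    else
      PySem.Int.toStr qualifying ++ " practice cohorts with ≥" ++ PySem.Int.toStr min_n ++ " projects"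

-- ===== PORT B =====
-- the while loop of Source B: k = keys[0]; rest = [x for x in keys if x != k];
-- if len(keys) - len(rest) >= min_n: qualifying += 1; keys = rest
def pvPartitionLoop (min_n : Int) (qualifying : Int) : List String → Int
  | [] => qualifying
  | k :: tl =>
    let rest := (k :: tl).filter (fun x => x ≠ k)
    pvPartitionLoop min_n
      (if min_n ≤ ((k :: tl).length : Int) - (rest.length : Int) then qualifying + 1 else qualifying)
      rest
  termination_by keys => keys.length
  decreasing_by
    simp only [List.filter_cons, decide_eq_true_eq]
    have h : ¬ (k ≠ k) := fun h => h rfl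
    simp only [h, if_false]
    exact Nat.lt_succ_of_le (List.length_filter_le _ _)

def takeaway_cohort_learning_curve_alt (projects : List (List (String × String))) (aggregates : List (String × String)) (min_n : Int) : String :=
  if projects = [] then "Not enough data yet"
  else
    let keys := projects.map pvKeyOf
    let qualifying := pvPartitionLoop min_n 0 keys
    if qualifying = 0 then
      "No cohort reached " ++ PySem.Int.toStr min_n ++ " projects yet"
    else
      PySem.Int.toStr qualifying ++ " practice cohorts with ≥" ++ PySem.Int.toStr min_n ++ " projects"

-- ===== PRECONDITION & SPEC =====
def Spec_takeaway_cohort_learning_curve (projects : List (List (String × String))) (aggregates : List (String × String)) (min_n : Int) (out : String) : Prop := out = takeaway_cohort_learning_curve_alt projects aggregates min_n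
instance (projects : List (List (String × String))) (aggregates : List (String × String)) (min_n : Int) (out : String) : Decidable (Spec_takeaway_cohort_learning_curve projects aggregates min_n out) := by unfold Spec_takeaway_cohort_learning_curve; infer_instance

-- ===== CLAIM (what is proved, stated in full; the proofs are below) =====
def Claim_equal_takeaway_cohort_learning_curve : Prop := ∀ (projects : List (List (String × String))) (aggregates : List (String × String)) (min_n : Int), Dom_takeaway_cohort_learning_curve projects aggregates min_n → Spec_takeaway_cohort_learning_curve projects aggregates min_n (takeaway_cohort_learning_curve projects aggregates min_n)

-- ===== LEMMAS AND PROOFS =====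

-- the number of distinct keys of ks whose multiplicity in ks is at least t
def pvQual (t : Int) (ks : List String) : Nat :=
  (PySem.Set.ofList ks).countP (fun k => decide (t ≤ (ks.count k : Int)))

-- peeling the first key off: the distinct keys of k :: tl are k plus those of tl with k removed
lemma pvQual_peel (t : Int) (k : String) (tl : List String) :
    pvQual t (k :: tl)
      = (if t ≤ (tl.count k : Int) + 1 then 1 else 0) + pvQual t (tl.filter (fun x => x ≠ k)) := by
  classical
  set F := tl.filter (fun x => x ≠ k) with hF
  have hkF : k ∉ F := by
    intro h
    have := List.of_mem_filter h
    simp at this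
  -- the two nodup lists of distinct keys have the same members, hence are permutations
  have hperm : (PySem.Set.ofList (k :: tl)).Perm (k :: PySem.Set.ofList F) := by
    refine (List.perm_ext_iff_of_nodup (PySem.Set.nodup_ofList _) ?_).2 ?_
    · exact List.Nodup.cons (fun h => hkF ((PySem.Set.mem_ofList F k).1 h)) (PySem.Set.nodup_ofList _)
    · intro a
      simp only [PySem.Set.mem_ofList, List.mem_cons, hF, List.mem_filter, decide_eq_true_eq]
      constructor
      · rintro (rfl | ha)
        · left; rfl
        · by_cases hak : a = k
          · left; exact hak
          · right; exact ⟨ha, hak⟩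
      · rintro (rfl | ⟨ha, -⟩)
        · left; rfl
        · right; exact ha
  unfold pvQual
  rw [hperm.countP_eq, List.countP_cons]
  have hcount : ∀ a ∈ PySem.Set.ofList F, (k :: tl).count a = F.count a := by
    intro a ha
    have haF : a ∈ F := (PySem.Set.mem_ofList F a).1 ha
    have hak : a ≠ k := by
      have := List.of_mem_filter haF
      simpa using this
    rw [List.count_cons_of_ne (Ne.symm hak), hF]
    exact (List.count_filter (by simp [hak])).symm
  have hcongr : (PySem.Set.ofList F).countP (fun a => decide (t ≤ ((k :: tl).count a : Int)))
      = (PySem.Set.ofList F).countP (fun a => decide (t ≤ (F.count a : Int))) := by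
    apply List.countP_congr
    intro a ha
    rw [hcount a ha]
  rw [hcongr]
  simp only [List.count_cons_self, decide_eq_true_eq]
  have hiff : t ≤ ((tl.count k + 1 : Nat) : Int) ↔ t ≤ (tl.count k : Int) + 1 := by
    push_cast
    exact Iff.rfl
  by_cases h : t ≤ (tl.count k : Int) + 1
  · rw [if_pos (hiff.mpr h), if_pos h]
    omega
  · rw [if_neg (fun hh => h (hiff.mp hh)), if_neg h]
    omega

-- on a cons, one step of B's loop peels exactly pvQual's first summand
lemma pvRest_len (k : String) (tl : List String) :
    ((k :: tl).filter (fun x => x ≠ k)).length = tl.length - tl.count k := by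
  classical
  have h1 : (k :: tl).filter (fun x => x ≠ k) = tl.filter (fun x => x ≠ k) := by
    simp
  rw [h1, ← List.countP_eq_length_filter]
  have h2 : tl.countP (fun x => decide (x ≠ k)) + tl.countP (fun x => x == k) = tl.length := by
    have := List.length_eq_countP_add_countP (p := fun x => x == k) (l := tl)
    have he : (fun a : String => decide ¬((a == k) = true)) = (fun x : String => decide (x ≠ k)) := by
      funext x; by_cases hx : x = k <;> simp [hx]
    rw [he] at this
    omega
  have h3 : tl.count k = tl.countP (fun x => x == k) := rfl
  omega

lemma pvCount_le_len (k : String) (tl : List String) : tl.count k ≤ tl.length :=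
  List.count_le_length

-- B's loop computes qualifying + pvQual
lemma pvPartitionLoop_eq (t : Int) : ∀ (n : Nat) (ks : List String), ks.length ≤ n →
    ∀ (q : Int), pvPartitionLoop t q ks = q + (pvQual t ks : Int) := by
  intro n
  induction n with
  | zero =>
    intro ks hks q
    have : ks = [] := List.eq_nil_of_length_eq_zero (Nat.le_zero.1 hks)
    subst this
    simp [pvPartitionLoop, pvQual, PySem.Set.ofList]
  | succ n ih =>
    intro ks hks q
    match ks with
    | [] => simp [pvPartitionLoop, pvQual, PySem.Set.ofList]
    | k :: tl =>
      rw [pvPartitionLoop]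
      have hrlen : ((k :: tl).filter (fun x => x ≠ k)).length ≤ n := by
        rw [pvRest_len]
        have := pvCount_le_len k tl
        have htl : tl.length ≤ n := by simpa using Nat.succ_le_succ_iff.1 hks
        omega
      rw [ih _ hrlen]
      have hfc : (k :: tl).filter (fun x => x ≠ k) = tl.filter (fun x => x ≠ k) := by
        simp
      have hlen : ((k :: tl).length : Int) - (((k :: tl).filter (fun x => x ≠ k)).length : Int)
          = (tl.count k : Int) + 1 := by
        rw [pvRest_len]
        have := pvCount_le_len k tl
        simp only [List.length_cons]
        push_cast [Nat.cast_sub this]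
        ring
      rw [hlen, hfc, pvQual_peel]
      push_cast
      split_ifs <;> ring

-- A's two passes compute pvQual min_n of the key list
lemma pvA_qual (min_n : Int) (ks : List String) :
    (PySem.Dict.counter ks).values.foldl
        (fun acc n => if min_n ≤ n then acc + 1 else acc) 0
      = (pvQual min_n ks : Int) := by
  rw [PySem.List.foldl_ite_add_one]
  have hv : (PySem.Dict.counter ks).values
      = (PySem.Dict.counter ks).keys.map (fun k => (PySem.Dict.counter ks).getD k 0) :=
    PySem.Dict.values_eq_map_keys _ (PySem.Dict.nodup_keys_counter ks) 0
  rw [hv, List.countP_map, PySem.Dict.keys_counter]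
  unfold pvQual
  simp only [Function.comp_def, PySem.Dict.getD_counter]
  omega

-- ===== VERDICT (by name: the statement is the Claim_ definition above) =====
theorem takeaway_cohort_learning_curve_spec : Claim_equal_takeaway_cohort_learning_curve := by
  intro projects aggregates min_n _
  unfold Spec_takeaway_cohort_learning_curve
  unfold takeaway_cohort_learning_curve takeaway_cohort_learning_curve_alt
  by_cases hp : projects = []
  · simp [hp]
  · simp only [hp, if_false]
    have hA : projects.foldl (fun d p => d.modify (pvKeyOf p) 0 (· + 1)) PySem.Dict.empty
        = PySem.Dict.counter (projects.map pvKeyOf) := by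
      have h := (PySem.Dict.counter_eq_foldl (xs := projects.map pvKeyOf)).symm
      rw [List.foldl_map] at h
      exact h
    have hB := pvPartitionLoop_eq min_n (projects.map pvKeyOf).length (projects.map pvKeyOf)
      (le_refl _) 0
    rw [zero_add] at hB
    simp only [hA, hB, pvA_qual]
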